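-- pv_equiv track=rewrite | github.com/Rewat05/Artificial-Intelligence-Lab-Group-ALTUS | Lab 1/rabbit_leap_bfs.py | bfs
-- ===== SOURCE A (Python) =====
-- from collections import deque
--
-- def is_goal_state(state):
--     return state == "EEE_WWW"
--
-- def get_successors(state):
--     successors = []
--     empty_index = state.index('_')
--     possible_moves = [
--         (empty_index - 1, empty_index),  # Move left
--         (empty_index + 1, empty_index),  # Move right
--         (empty_index - 2, empty_index),  # Jump left
--         (empty_index + 2, empty_index)   # Jump right
--     ]
--
--     for move in possible_moves:
--         if 0 <= move[0] < len(state):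
--             new_state = list(state)
--             new_state[empty_index], new_state[move[0]] = new_state[move[0]], new_state[empty_index]
--             successors.append(''.join(new_state))
--
--     return successors
--
-- def bfs(start_state):
--     queue = deque([(start_state, [])])
--     visited = set()
--     while queue:
--         (state, path) = queue.popleft()
--         if state in visited:
--             continue
--         visited.add(state)
--         path = path + [state]
--         if is_goal_state(state):
--             return path
--         for successor in get_successors(state):
--             queue.append((successor, path))
--     return None
-- ===== SOURCE B (Python) =====
-- from collections import deque
--
-- def bfs(start_state):
--     # Parent-pointer BFS: the queue holds bare states (no path per entry); the
--     # first discoverer of a state is recorded in `parent`, and the path is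
--     # rebuilt by walking parent links only when the goal is popped.
--     parent = {}
--     queue = deque([start_state])
--     while queue:
--         state = queue.popleft()
--         if state == "EEE_WWW":
--             path = [state]
--             while path[-1] != start_state:
--                 path.append(parent[path[-1]])
--             return path[::-1]
--         e = state.index('_')
--         for d in (-1, 1, -2, 2):
--             j = e + d
--             if 0 <= j < len(state):
--                 lst = list(state)
--                 lst[e], lst[j] = lst[j], lst[e]
--                 succ = ''.join(lst)
--                 if succ != start_state and succ not in parent:
--                     parent[succ] = state
--                     queue.append(succ)
--     return None
-- ===== Notes on version B (the rewrite author's own statement) =====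
-- stated objective: alternative
-- what changed: B's queue holds bare states instead of (state, accumulated path) pairs: a parent dict records each state's first discoverer, successors are generated by an inline offset loop with enqueue-time dedup, and the path is reconstructed once by walking parent links back from the goal and reversing.
import Mathlib
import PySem

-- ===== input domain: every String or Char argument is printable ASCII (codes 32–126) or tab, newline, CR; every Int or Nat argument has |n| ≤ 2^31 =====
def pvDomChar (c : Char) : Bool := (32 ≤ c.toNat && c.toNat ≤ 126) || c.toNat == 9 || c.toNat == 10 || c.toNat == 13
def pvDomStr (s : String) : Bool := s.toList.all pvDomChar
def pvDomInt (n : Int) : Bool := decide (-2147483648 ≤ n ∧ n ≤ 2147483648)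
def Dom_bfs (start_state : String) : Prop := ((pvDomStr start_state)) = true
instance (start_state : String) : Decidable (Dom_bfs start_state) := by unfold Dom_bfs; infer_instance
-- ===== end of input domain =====

-- B replaces A's (state, accumulated-path) queue by a bare-state queue with a
-- parent dictionary: successors come from an inline offset loop with
-- enqueue-time dedup, and the path is rebuilt from parent links at the goal.

-- ===== PORT A =====
def is_goal_state (state : String) : Bool := state == "EEE_WWW"

-- Python's simultaneous `new_state[i], new_state[j] = new_state[j], new_state[i]`
-- (both indices are in range after Python's negative wrap in every call the
-- two programs make, since they come from `state.index('_')` and a 0 ≤ j < len guard)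
def pySwap (l : List Char) (i j : Int) : List Char :=
  (l.set (if i < 0 then i + l.length else i).toNat
      (l.getD (if j < 0 then j + l.length else j).toNat ' ')).set
    (if j < 0 then j + l.length else j).toNat
    (l.getD (if i < 0 then i + l.length else i).toNat ' ')

-- state.index('_') ported via PySem.Str.find: exact whenever '_' ∈ state
-- (guaranteed for every state either BFS visits under Pre_bfs)
def get_successors (state : String) : List String :=
  [(PySem.Str.find state "_" - 1, PySem.Str.find state "_"),
   (PySem.Str.find state "_" + 1, PySem.Str.find state "_"),
   (PySem.Str.find state "_" - 2, PySem.Str.find state "_"),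
   (PySem.Str.find state "_" + 2, PySem.Str.find state "_")].foldl
    (fun successors move =>
      if 0 ≤ move.1 ∧ move.1 < (state.toList.length : Int) then
        successors ++ [String.ofList (pySwap state.toList (PySem.Str.find state "_") move.1)]
      else successors) []

-- fuel for the while-loops: every state either BFS handles is a permutation of
-- the start string, each unit of fuel is spent only on a never-before-seen
-- state, and a length-n string has at most n! distinct permutations, so the
-- loops below can never exhaust `fuelFor start` (totality guard only; the
-- equivalence theorem does not depend on this bound being sufficient)
def fuelFor (s : String) : Nat := Nat.factorial s.toList.length + 1

-- Python's deque, functionally: pop from `front`, push onto `back`,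
-- refill `front` from `back.reverse` when it empties (exact FIFO order)
def dqPop {α : Type} : List α → List α → Option (α × (List α × List α))
  | [], back =>
    match back.reverse with
    | [] => none
    | x :: f => some (x, (f, []))
  | x :: f, back => some (x, (f, back))

-- Source A's `while queue: state, path = queue.popleft(); if state in visited: continue`
-- skip phase: pops until the first unvisited entry (recursion on the queue size).
-- `visited` is Python's hash set; it is ported as a tree set, exact because only
-- membership and insertion are used and the result never depends on its order
-- (a list-backed set would make evaluation of the port quadratic).
def scanA (V : Std.TreeSet String) :
    List (String × List String) → List (String × List String) →
    Option ((String × List String) ×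
      (List (String × List String) × List (String × List String)))
  | [], back =>
    match hr : back.reverse with
    | [] => none
    | e :: f => if V.contains e.1 then scanA V f [] else some (e, (f, []))
  | e :: f, back => if V.contains e.1 then scanA V f back else some (e, (f, back))
termination_by f b => f.length + b.length
decreasing_by
  · have : back.length = f.length + 1 := by
      have h := congrArg List.length hr
      simpa using h
    simp [this]
  · simp

-- the rest of Source A's while-loop body: mark visited, extend the path, test the
-- goal, enqueue the successors (the for-loop is the foldl pushing onto `back`)
def whileA : Nat → List (String × List String) → List (String × List String) →
    Std.TreeSet String → Option (List String)
  | 0, _, _, _ => none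
  | fuel + 1, front, back, visited =>
    match scanA visited front back with
    | none => none
    | some ((state, path), (f', b')) =>
      if is_goal_state state then some (path ++ [state])
      else
        whileA fuel f'
          ((get_successors state).foldl (fun bk t => (t, path ++ [state]) :: bk) b')
          (visited.insert state)

def bfs (start_state : String) : Option (List String) :=
  whileA (fuelFor start_state) [(start_state, [])] [] Std.TreeSet.empty

-- ===== PORT B =====
-- body of Source B's `for d in (-1, 1, -2, 2)` loop: j = e + d, bounds check,
-- swap-and-join (the same Python lines as A's, hence the shared pySwap),
-- dedup against start/parent, then record the parent and enqueue.
-- `parent` is Python's dict; it is ported as a tree map, exact because only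
-- lookup, membership and insertion are used and the result never depends on
-- its insertion order.
def stepBT (start state : String) (e : Int)
    (acc : (List String × List String) × Std.TreeMap String String) (d : Int) :
    (List String × List String) × Std.TreeMap String String :=
  if 0 ≤ e + d ∧ e + d < (state.toList.length : Int) then
    if String.ofList (pySwap state.toList e (e + d)) ≠ start ∧
        acc.2.contains (String.ofList (pySwap state.toList e (e + d))) = false then
      ((acc.1.1, String.ofList (pySwap state.toList e (e + d)) :: acc.1.2),
       acc.2.insert (String.ofList (pySwap state.toList e (e + d))) state)
    else acc
  else acc

-- Source B's reconstruction `while path[-1] != start_state:` loop; the Lean `path`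
-- is Python's list reversed (Python appends at the tail and returns path[::-1];
-- the port conses at the head and returns the list as built). Fuel
-- `parent.size + 1` can never run out: the walk visits distinct keys of
-- `parent` plus `start` (proved below); `none` = fuel out or KeyError, both unreachable.
def reconRBT : Nat → Std.TreeMap String String → String → List String → Option (List String)
  | 0, _, _, _ => none
  | f + 1, parent, start, path =>
    match path with
    | [] => none
    | x :: _ =>
      if x == start then some path
      else
        match parent[x]? with
        | none => none
        | some q => reconRBT f parent start (q :: path)

def whileB : Nat → List String → List String → Std.TreeMap String String → String →
    Option (List String)
  | 0, _, _, _, _ => none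
  | fuel + 1, front, back, parent, start =>
    match dqPop front back with
    | none => none
    | some (state, (f', b')) =>
      if state == "EEE_WWW" then reconRBT (parent.size + 1) parent start [state]
      else
        whileB fuel
          ([(-1 : Int), 1, -2, 2].foldl (stepBT start state (PySem.Str.find state "_"))
            ((f', b'), parent)).1.1
          ([(-1 : Int), 1, -2, 2].foldl (stepBT start state (PySem.Str.find state "_"))
            ((f', b'), parent)).1.2
          ([(-1 : Int), 1, -2, 2].foldl (stepBT start state (PySem.Str.find state "_"))
            ((f', b'), parent)).2
          start

def bfs_alt (start_state : String) : Option (List String) :=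
  whileB (fuelFor start_state) [start_state] [] Std.TreeMap.empty start_state

-- ===== PRECONDITION & SPEC =====
-- Pre_bfs excludes exactly the inputs on which Python A raises ValueError:
-- start states containing no underscore character (str.index fails on the very first pop).
def Pre_bfs (start_state : String) : Prop := '_' ∈ start_state.toList
instance (start_state : String) : Decidable (Pre_bfs start_state) := by unfold Pre_bfs; infer_instance
def pvWitness_bfs : String := "E_W"

def Spec_bfs (start_state : String) (out : Option (List String)) : Prop := out = bfs_alt start_state
instance (start_state : String) (out : Option (List String)) : Decidable (Spec_bfs start_state out) := by unfold Spec_bfs; infer_instance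

-- ===== CLAIM (what is proved, stated in full; the proofs are below) =====
def Claim_equal_bfs : Prop := ∀ (start_state : String), Dom_bfs start_state → Pre_bfs start_state → Spec_bfs start_state (bfs start_state)

-- ===== LEMMAS AND PROOFS =====

-- list/association-list models of the two loops (queue as one plain list,
-- visited as PySem.Set, parent as PySem.Dict); the ports are proved equal to
-- these models by data refinement, and the models are proved equal to each other
def mScanA (next : List (String × List String) → PySem.Set String → Option (List String)) :
    List (String × List String) → PySem.Set String → Option (List String)
  | [], _ => none
  | (state, path) :: rest, visited =>
    if state ∈ visited then mScanA next rest visited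
    else if is_goal_state state then some (path ++ [state])
    else next (rest ++ (get_successors state).map (fun t => (t, path ++ [state])))
      (PySem.Set.add visited state)

def mLoopA : Nat → List (String × List String) → PySem.Set String → Option (List String)
  | 0, _, _ => none
  | fuel + 1, queue, visited => mScanA (mLoopA fuel) queue visited


def mStepB (start state : String) (e : Int)
    (acc : List String × PySem.Dict String String) (d : Int) :
    List String × PySem.Dict String String :=
  if 0 ≤ e + d ∧ e + d < (state.toList.length : Int) then
    if String.ofList (pySwap state.toList e (e + d)) ≠ start ∧
        acc.2.contains (String.ofList (pySwap state.toList e (e + d))) = false then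
      (acc.1 ++ [String.ofList (pySwap state.toList e (e + d))],
       acc.2.insert (String.ofList (pySwap state.toList e (e + d))) state)
    else acc
  else acc

def mRecon : Nat → PySem.Dict String String → String → List String → Option (List String)
  | 0, _, _, _ => none
  | f + 1, parent, start, path =>
    match path with
    | [] => none
    | x :: _ =>
      if x == start then some path
      else
        match parent.get? x with
        | none => none
        | some q => mRecon f parent start (q :: path)

def mLoopB : Nat → List String → PySem.Dict String String → String → Option (List String)
  | 0, _, _, _ => none
  | _ + 1, [], _, _ => none
  | fuel + 1, state :: rest, parent, start =>
    if state == "EEE_WWW" then mRecon (parent.size + 1) parent start [state]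
    else
      mLoopB fuel
        ([(-1 : Int), 1, -2, 2].foldl (mStepB start state (PySem.Str.find state "_")) (rest, parent)).1
        ([(-1 : Int), 1, -2, 2].foldl (mStepB start state (PySem.Str.find state "_")) (rest, parent)).2
        start




-- "discovered" in Source B: a state is the start or a key of the parent dict
def DiscP (P : PySem.Dict String String) (start x : String) : Prop :=
  x = start ∨ P.contains x = true

-- parent-link chain: `Chain P start p s` says Source B's reconstruction from s
-- walks exactly the forward path p ++ [s] (head = start, each link in P)
inductive Chain (P : PySem.Dict String String) (start : String) : List String → String → Prop
  | base : Chain P start [] start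
  | step {p : List String} {t s : String} :
      Chain P start p t → P.get? s = some t → s ≠ start → Chain P start (p ++ [t]) s

-- first-occurrence filter: what remains of A's queue after dropping entries
-- whose state is already visited or occurred earlier in the queue
def ffo (q : List (String × List String)) (seen : List String) : List (String × List String) :=
  match q with
  | [] => []
  | (s, p) :: t => if s ∈ seen then ffo t seen else (s, p) :: ffo t (s :: seen)

def seenAfter (q : List (String × List String)) (seen : List String) : List String :=
  match q with
  | [] => seen
  | (s, _) :: t => if s ∈ seen then seenAfter t seen else seenAfter t (s :: seen)

-- the sublist of `l` that is new relative to `seen` (first occurrences only):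
-- exactly the states Source B's inner loop appends
def newsOf (l : List String) (seen : List String) : List String :=
  match l with
  | [] => []
  | t :: ts => if t ∈ seen then newsOf ts seen else t :: newsOf ts (t :: seen)

-- Source B's inner-loop body abstracted over an arbitrary successor list
def gfun (start state : String) (acc : List String × PySem.Dict String String)
    (t : String) : List String × PySem.Dict String String :=
  if t ≠ start ∧ acc.2.contains t = false then (acc.1 ++ [t], acc.2.insert t state) else acc

theorem mem_newsOf : ∀ (l seen : List String) (x : String),
    x ∈ newsOf l seen ↔ x ∈ l ∧ x ∉ seen := by
  intro l
  induction l with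
  | nil => simp [newsOf]
  | cons t ts ih =>
    intro seen x
    simp only [newsOf]
    by_cases h : t ∈ seen
    · rw [if_pos h, ih]
      constructor
      · rintro ⟨h1, h2⟩; exact ⟨List.mem_cons_of_mem _ h1, h2⟩
      · rintro ⟨h1, h2⟩
        rcases List.mem_cons.mp h1 with rfl | h1
        · exact absurd h h2
        · exact ⟨h1, h2⟩
    · rw [if_neg h]
      simp only [List.mem_cons, ih]
      constructor
      · rintro (rfl | ⟨h1, h2⟩)
        · exact ⟨Or.inl rfl, h⟩
        · exact ⟨Or.inr h1, fun hx => h2 (Or.inr hx)⟩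
      · rintro ⟨rfl | h1, h2⟩
        · exact Or.inl rfl
        · by_cases hxt : x = t
          · exact Or.inl hxt
          · exact Or.inr ⟨h1, by simp [hxt, h2]⟩

theorem ffo_congr : ∀ (q : List (String × List String)) (s1 s2 : List String),
    (∀ x, x ∈ s1 ↔ x ∈ s2) → ffo q s1 = ffo q s2 := by
  intro q
  induction q with
  | nil => intros; rfl
  | cons e t ih =>
    intro s1 s2 h
    obtain ⟨s, p⟩ := e
    simp only [ffo]
    by_cases hs : s ∈ s1
    · rw [if_pos hs, if_pos ((h s).mp hs), ih s1 s2 h]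
    · rw [if_neg hs, if_neg (fun hx => hs ((h s).mpr hx)),
        ih (s :: s1) (s :: s2) (by intro x; simp [h x])]

theorem mem_seenAfter : ∀ (q : List (String × List String)) (seen : List String) (x : String),
    x ∈ seenAfter q seen ↔ x ∈ seen ∨ x ∈ q.map Prod.fst := by
  intro q
  induction q with
  | nil => simp [seenAfter]
  | cons e t ih =>
    intro seen x
    obtain ⟨s, p⟩ := e
    simp only [seenAfter]
    by_cases hs : s ∈ seen
    · rw [if_pos hs, ih]
      simp only [List.map_cons, List.mem_cons]
      constructor
      · rintro (h | h)
        · exact Or.inl h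
        · exact Or.inr (Or.inr h)
      · rintro (h | rfl | h)
        · exact Or.inl h
        · exact Or.inl hs
        · exact Or.inr h
    · rw [if_neg hs, ih]
      simp only [List.mem_cons, List.map_cons]
      tauto

theorem ffo_append : ∀ (q1 q2 : List (String × List String)) (seen : List String),
    ffo (q1 ++ q2) seen = ffo q1 seen ++ ffo q2 (seenAfter q1 seen) := by
  intro q1
  induction q1 with
  | nil => intros; simp [ffo, seenAfter]
  | cons e t ih =>
    intro q2 seen
    obtain ⟨s, p⟩ := e
    simp only [List.cons_append, ffo, seenAfter]
    by_cases hs : s ∈ seen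
    · simp only [if_pos hs, ih]
    · simp only [if_neg hs, ih]
      simp

theorem newsOf_congr : ∀ (l s1 s2 : List String),
    (∀ x, x ∈ s1 ↔ x ∈ s2) → newsOf l s1 = newsOf l s2 := by
  intro l
  induction l with
  | nil => intros; rfl
  | cons t ts ih =>
    intro s1 s2 h
    simp only [newsOf]
    by_cases hs : t ∈ s1
    · rw [if_pos hs, if_pos ((h t).mp hs), ih s1 s2 h]
    · rw [if_neg hs, if_neg (fun hx => hs ((h t).mpr hx)),
        ih (t :: s1) (t :: s2) (by intro x; simp [h x])]

theorem ffo_map_const : ∀ (succs : List String) (path : List String) (seen : List String),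
    ffo (succs.map (fun t => (t, path))) seen =
      (newsOf succs seen).map (fun t => (t, path)) := by
  intro succs
  induction succs with
  | nil => intros; rfl
  | cons t ts ih =>
    intro path seen
    simp only [List.map_cons, ffo, newsOf]
    by_cases hs : t ∈ seen
    · rw [if_pos hs, if_pos hs, ih]
    · rw [if_neg hs, if_neg hs, ih]
      simp

-- Source B's literal delta loop equals the fold of gfun over A's successor list
theorem fold_guard (start state : String) (c : Int → Prop) [DecidablePred c] (F : Int → String) :
    ∀ (ds : List Int) (q : List String × PySem.Dict String String) (l0 : List String),
    ds.foldl (fun acc j => if c j then gfun start state acc (F j) else acc)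
        (l0.foldl (gfun start state) q)
      = (ds.foldl (fun l j => if c j then l ++ [F j] else l) l0).foldl (gfun start state) q := by
  intro ds
  induction ds with
  | nil => intros; rfl
  | cons j t ih =>
    intro q l0
    simp only [List.foldl_cons]
    by_cases hc : c j
    · rw [if_pos hc, if_pos hc]
      have : gfun start state (l0.foldl (gfun start state) q) (F j)
          = (l0 ++ [F j]).foldl (gfun start state) q := by
        rw [List.foldl_append]
        rfl
      rw [this, ih q (l0 ++ [F j])]
    · rw [if_neg hc, if_neg hc]
      exact ih q l0

theorem foldB_bridge (start state : String) (q : List String)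
    (P : PySem.Dict String String) :
    [(-1 : Int), 1, -2, 2].foldl (mStepB start state (PySem.Str.find state "_")) (q, P) =
      (get_successors state).foldl (gfun start state) (q, P) := by
  have hmap : ([(-1 : Int), 1, -2, 2].map (PySem.Str.find state "_" + ·)) =
      [PySem.Str.find state "_" - 1, PySem.Str.find state "_" + 1,
       PySem.Str.find state "_" - 2, PySem.Str.find state "_" + 2] := by
    simp [List.map, sub_eq_add_neg]
  have h1 : [(-1 : Int), 1, -2, 2].foldl (mStepB start state (PySem.Str.find state "_")) (q, P)
      = ([(-1 : Int), 1, -2, 2].map (PySem.Str.find state "_" + ·)).foldl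
          (fun acc j => if 0 ≤ j ∧ j < (state.toList.length : Int) then
            gfun start state acc (String.ofList (pySwap state.toList (PySem.Str.find state "_") j))
          else acc) (q, P) := by
    rw [List.foldl_map]
    rfl
  rw [h1, hmap]
  have h2 := fold_guard start state
    (fun j => 0 ≤ j ∧ j < (state.toList.length : Int))
    (fun j => String.ofList (pySwap state.toList (PySem.Str.find state "_") j))
    [PySem.Str.find state "_" - 1, PySem.Str.find state "_" + 1,
     PySem.Str.find state "_" - 2, PySem.Str.find state "_" + 2] (q, P) []
  exact h2

theorem chain_mono {P Q : PySem.Dict String String} {start : String}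
    (hmono : ∀ k v, P.get? k = some v → Q.get? k = some v) :
    ∀ {p : List String} {s : String}, Chain P start p s → Chain Q start p s := by
  intro p s hch
  induction hch with
  | base => exact Chain.base
  | step hc hget hne ih => exact Chain.step ih (hmono _ _ hget) hne

theorem get?_insert_mono {P : PySem.Dict String String} {t v : String}
    (hfresh : P.contains t = false) :
    ∀ k w, P.get? k = some w → (P.insert t v).get? k = some w := by
  intro k w hk
  have hne : k ≠ t := by
    intro h
    subst h
    rw [(PySem.Dict.get?_eq_none_iff_contains P k).mpr hfresh] at hk
    cases hk
  rw [PySem.Dict.get?_insert_of_ne P v hne]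
  exact hk

theorem disc_insert_iff (P : PySem.Dict String String) (start t v x : String) :
    DiscP (P.insert t v) start x ↔ x = t ∨ DiscP P start x := by
  simp only [DiscP, PySem.Dict.contains_insert, Bool.or_eq_true, beq_iff_eq]
  tauto

-- what one pass of Source B's inner loop (as gfun over an arbitrary successor
-- list) does to the queue, the discovered predicate and the parent links
theorem foldG_spec : ∀ (succs : List String) (q : List String)
    (P : PySem.Dict String String) (seen : List String) (state start : String),
    (∀ x, DiscP P start x ↔ x ∈ seen) →
    (succs.foldl (gfun start state) (q, P)).1 = q ++ newsOf succs seen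
    ∧ (∀ x, DiscP (succs.foldl (gfun start state) (q, P)).2 start x ↔
        x ∈ seen ∨ x ∈ newsOf succs seen)
    ∧ (∀ k v, P.get? k = some v →
        (succs.foldl (gfun start state) (q, P)).2.get? k = some v)
    ∧ (∀ t ∈ newsOf succs seen,
        (succs.foldl (gfun start state) (q, P)).2.get? t = some state) := by
  intro succs
  induction succs with
  | nil =>
    intro q P seen state start hSeen
    refine ⟨by simp [newsOf], fun x => by simp [newsOf, hSeen x], fun k v h => h, ?_⟩
    intro t ht
    simp [newsOf] at ht
  | cons t ts ih =>
    intro q P seen state start hSeen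
    by_cases hmem : t ∈ seen
    · have hdisc : DiscP P start t := (hSeen t).mpr hmem
      have hstep : gfun start state (q, P) t = (q, P) := by
        rcases hdisc with h | h
        · simp [gfun, h]
        · simp [gfun, h]
      have hnews : newsOf (t :: ts) seen = newsOf ts seen := by
        simp [newsOf, hmem]
      simp only [List.foldl_cons, hstep, hnews]
      exact ih q P seen state start hSeen
    · have hndisc : ¬ DiscP P start t := fun h => hmem ((hSeen t).mp h)
      have hnstart : t ≠ start := fun h => hndisc (Or.inl h)
      have hncont : P.contains t = false := by
        cases hc : P.contains t
        · rfl
        · exact absurd (Or.inr hc) hndisc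
      have hstep : gfun start state (q, P) t = (q ++ [t], P.insert t state) := by
        simp [gfun, hnstart, hncont]
      have hSeen' : ∀ x, DiscP (P.insert t state) start x ↔ x ∈ t :: seen := by
        intro x
        rw [disc_insert_iff, hSeen x]
        simp [List.mem_cons]
      have hnews : newsOf (t :: ts) seen = t :: newsOf ts (t :: seen) := by
        simp [newsOf, hmem]
      obtain ⟨ihq, ihd, ihm, ihn⟩ := ih (q ++ [t]) (P.insert t state) (t :: seen) state start hSeen'
      simp only [List.foldl_cons, hstep, hnews]
      refine ⟨by rw [ihq]; simp, ?_, ?_, ?_⟩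
      · intro x
        rw [ihd x]
        simp only [List.mem_cons]
        tauto
      · intro k v hk
        exact ihm k v (get?_insert_mono hncont k v hk)
      · intro u hu
        rcases List.mem_cons.mp hu with rfl | hu
        · exact ihm u state (PySem.Dict.get?_insert_self P u state)
        · exact ihn u hu

-- Source B's reconstruction loop follows a parent chain exactly
theorem mRecon_spec {P : PySem.Dict String String} {start : String} :
    ∀ {p : List String} {s : String}, Chain P start p s →
    ∀ (f : Nat) (acc : List String), p.length + 1 ≤ f →
    mRecon f P start (s :: acc) = some (p ++ s :: acc) := by
  intro p s hch
  induction hch with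
  | base =>
    intro f acc hf
    match f, hf with
    | f' + 1, _ => simp [mRecon]
  | @step p t s hc hget hne ih =>
    intro f acc hf
    match f, hf with
    | f' + 1, hf =>
      have hne' : (s == start) = false := by
        simp [hne]
      have hf' : p.length + 1 ≤ f' := by
        simp at hf
        omega
      simp only [mRecon, hne', Bool.false_eq_true, if_false, hget]
      rw [ih f' (s :: acc) hf']
      simp

-- a nodup chain of discovered states is no longer than the parent dict plus start
theorem chain_length_le {P : PySem.Dict String String} {start s : String}
    {p : List String} (hnd : (p ++ [s]).Nodup)
    (hdisc : ∀ x ∈ p ++ [s], DiscP P start x) :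
    p.length + 1 ≤ P.size + 1 := by
  classical
  set l := p ++ [s] with hl
  have hsub : l.filter (fun x => x ≠ start) ⊆ PySem.Dict.keys P := by
    intro x hx
    have hx' := List.mem_filter.mp hx
    rcases hdisc x hx'.1 with h | h
    · exact absurd h (by simpa using hx'.2)
    · exact (PySem.Dict.contains_iff_mem_keys P x).mp h
  have hndf : (l.filter (fun x => x ≠ start)).Nodup := hnd.filter _
  have hcard : (l.filter (fun x => x ≠ start)).length ≤ (PySem.Dict.keys P).length := by
    have h1 : (l.filter (fun x => x ≠ start)).length =
        (l.filter (fun x => x ≠ start)).toFinset.card :=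
      (List.toFinset_card_of_nodup hndf).symm
    have h2 : (l.filter (fun x => x ≠ start)).toFinset ⊆ (PySem.Dict.keys P).toFinset := by
      intro x hx
      exact List.mem_toFinset.mpr (hsub (List.mem_toFinset.mp hx))
    calc (l.filter (fun x => x ≠ start)).length
        = (l.filter (fun x => x ≠ start)).toFinset.card := h1
      _ ≤ (PySem.Dict.keys P).toFinset.card := Finset.card_le_card h2
      _ ≤ (PySem.Dict.keys P).length := (PySem.Dict.keys P).toFinset_card_le
  have hkeys : (PySem.Dict.keys P).length = P.size := by
    simp [PySem.Dict.keys, PySem.Dict.size]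
  have hcount : l.count start ≤ 1 := List.nodup_iff_count_le_one.mp hnd start
  have hsplit : l.length = (l.filter (fun x => x ≠ start)).length + l.count start := by
    have h := List.length_eq_countP_add_countP (p := fun x => decide (x ≠ start)) (l := l)
    rw [List.countP_eq_length_filter] at h
    rw [h, List.count_eq_countP]
    congr 1
    apply List.countP_congr
    intro x _
    by_cases hx : x = start <;> simp [hx]
  have hlen : l.length = p.length + 1 := by simp [hl]
  omega

-- the two while-loops in lock step: A's queue with paths vs B's bare-state
-- queue plus parent dict (related through the first-occurrence filter ffo)
theorem loops_agree : ∀ (k : Nat) (QA : List (String × List String))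
    (VA : PySem.Set String) (P : PySem.Dict String String) (start : String),
    (∀ s p, (s, p) ∈ ffo QA VA →
      Chain P start p s ∧ (p ++ [s]).Nodup ∧ ∀ x ∈ p ++ [s], DiscP P start x) →
    (∀ x, DiscP P start x ↔ x ∈ VA ∨ x ∈ QA.map Prod.fst) →
    mLoopA k QA VA = mLoopB k ((ffo QA VA).map Prod.fst) P start := by
  intro k
  induction k with
  | zero => intros; rfl
  | succ k ihk =>
    intro QA
    induction QA with
    | nil =>
      intro VA P start hent hdisc
      rfl
    | cons e rest ihQ =>
      obtain ⟨s, p⟩ := e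
      intro VA P start hent hdisc
      by_cases hmem : s ∈ VA
      · have hffo : ffo ((s, p) :: rest) VA = ffo rest VA := by
          simp only [ffo, if_pos hmem]
        have hdisc' : ∀ x, DiscP P start x ↔ x ∈ VA ∨ x ∈ rest.map Prod.fst := by
          intro x
          rw [hdisc x]
          simp only [List.map_cons, List.mem_cons]
          constructor
          · rintro (h | rfl | h)
            · exact Or.inl h
            · exact Or.inl hmem
            · exact Or.inr h
          · rintro (h | h)
            · exact Or.inl h
            · exact Or.inr (Or.inr h)
        have hstep : mLoopA (k + 1) ((s, p) :: rest) VA = mLoopA (k + 1) rest VA := by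
          simp [mLoopA, mScanA, hmem]
        rw [hstep, hffo]
        exact ihQ VA P start (fun s' p' h => hent s' p' (by rw [hffo]; exact h)) hdisc'
      · have hffo : ffo ((s, p) :: rest) VA = (s, p) :: ffo rest (s :: VA) := by
          simp only [ffo, if_neg hmem]
        obtain ⟨hchain, hnd, helems⟩ := hent s p (by rw [hffo]; exact List.mem_cons_self)
        by_cases hg : is_goal_state s
        · have hA : mLoopA (k + 1) ((s, p) :: rest) VA = some (p ++ [s]) := by
            simp [mLoopA, mScanA, hmem, hg]
          have hgoal : (s == "EEE_WWW") = true := hg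
          have hB : mLoopB (k + 1) ((ffo ((s, p) :: rest) VA).map Prod.fst) P start =
              mRecon (P.size + 1) P start [s] := by
            rw [hffo]
            simp only [List.map_cons, mLoopB, hgoal, if_pos]
          rw [hA, hB, mRecon_spec hchain (P.size + 1) [] (chain_length_le hnd helems)]
        · have hgoal : (s == "EEE_WWW") = false := by
            simpa [is_goal_state] using hg
          set succs := get_successors s with hsuccs
          set seen := VA ++ ((s, p) :: rest).map Prod.fst with hseen
          have hSeen : ∀ x, DiscP P start x ↔ x ∈ seen := by
            intro x
            rw [hdisc x, hseen]
            simp [List.mem_append]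
          obtain ⟨hq1, hq2, hq3, hq4⟩ :=
            foldG_spec succs ((ffo rest (s :: VA)).map Prod.fst) P seen s start hSeen
          set r := succs.foldl (gfun start s) (((ffo rest (s :: VA)).map Prod.fst), P) with hr
          have hA : mLoopA (k + 1) ((s, p) :: rest) VA =
              mLoopA k (rest ++ succs.map (fun t => (t, p ++ [s]))) (PySem.Set.add VA s) := by
            simp [mLoopA, mScanA, hmem, hg, hsuccs]
          have hB : mLoopB (k + 1) ((ffo ((s, p) :: rest) VA).map Prod.fst) P start =
              mLoopB k r.1 r.2 start := by
            rw [hffo]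
            simp only [List.map_cons, mLoopB, hgoal, Bool.false_eq_true, if_false]
            rw [foldB_bridge, ← hsuccs, ← hr]
          rw [hA, hB]
          have hadd : PySem.Set.add VA s = VA ++ [s] := PySem.Set.add_of_not_mem hmem
          -- the seen-set after processing rest coincides with `seen`
          have hseenA : ∀ x, x ∈ seenAfter rest (VA ++ [s]) ↔ x ∈ seen := by
            intro x
            rw [mem_seenAfter, hseen]
            simp only [List.mem_append, List.mem_cons, List.map_cons]
            tauto
          have hffo' : ffo (rest ++ succs.map (fun t => (t, p ++ [s]))) (PySem.Set.add VA s) =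
              ffo rest (s :: VA) ++ (newsOf succs seen).map (fun t => (t, p ++ [s])) := by
            rw [hadd, ffo_append, ffo_map_const,
              ffo_congr rest (VA ++ [s]) (s :: VA) (by intro x; simp; tauto),
              newsOf_congr succs (seenAfter rest (VA ++ [s])) seen hseenA]
          have hq1' : r.1 = (ffo (rest ++ succs.map (fun t => (t, p ++ [s])))
              (PySem.Set.add VA s)).map Prod.fst := by
            rw [hffo', hq1]
            simp [List.map_map, Function.comp_def]
          rw [hq1']
          apply ihk
          · -- entry invariant for the new configuration
            intro s' p' hmem'
            rw [hffo'] at hmem'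
            have hdiscP : ∀ x, DiscP P start x → DiscP r.2 start x := by
              intro x hx
              exact (hq2 x).mpr (Or.inl ((hSeen x).mp hx))
            rcases List.mem_append.mp hmem' with hold | hnew
            · have hold' : (s', p') ∈ ffo ((s, p) :: rest) VA := by
                rw [hffo]
                exact List.mem_cons_of_mem _ hold
              obtain ⟨hc, hn, hd⟩ := hent s' p' hold'
              exact ⟨chain_mono hq3 hc, hn, fun x hx => hdiscP x (hd x hx)⟩
            · obtain ⟨t, htn, hteq⟩ := List.mem_map.mp hnew
              have ht1 : t = s' := congrArg Prod.fst hteq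
              have ht2 : p ++ [s] = p' := congrArg Prod.snd hteq
              subst ht1
              subst ht2
              have htn' := (mem_newsOf succs seen t).mp htn
              have htstart : t ≠ start := by
                intro h
                subst h
                exact htn'.2 ((hSeen t).mp (Or.inl rfl))
              refine ⟨Chain.step (chain_mono hq3 hchain) (hq4 t htn) htstart, ?_, ?_⟩
              · have htnotin : t ∉ p ++ [s] := by
                  intro hx
                  exact htn'.2 ((hSeen t).mp (helems t hx))
                rw [List.nodup_append]
                refine ⟨hnd, List.nodup_singleton t, ?_⟩
                intro a ha b hb
                rw [List.mem_singleton] at hb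
                subst hb
                exact fun h => htnotin (h ▸ ha)
              · intro x hx
                rcases List.mem_append.mp hx with hx | hx
                · exact hdiscP x (helems x hx)
                · have hxt : x = t := by simpa using hx
                  rw [hxt]
                  exact (hq2 t).mpr (Or.inr htn)
          · -- discovered-set invariant for the new configuration
            intro x
            rw [hq2 x]
            have hmemmap : ((rest ++ succs.map (fun t => (t, p ++ [s]))).map Prod.fst) =
                rest.map Prod.fst ++ succs := by
              simp [List.map_map, Function.comp_def]
            rw [hadd, hmemmap]
            simp only [List.mem_append, List.mem_singleton, mem_newsOf]
            constructor
            · rintro (hx | ⟨hx1, _⟩)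
              · rw [hseen] at hx
                simp only [List.mem_append, List.map_cons, List.mem_cons] at hx
                tauto
              · tauto
            · rintro ((hx | rfl) | hx | hx)
              · exact Or.inl (by rw [hseen]; simp [hx])
              · exact Or.inl (by rw [hseen]; simp)
              · exact Or.inl (by rw [hseen]; simp [hx])
              · by_cases hin : x ∈ seen
                · exact Or.inl hin
                · exact Or.inr ⟨hx, hin⟩


-- ===== data refinement: the ports compute what the list models compute =====

def absQ {α : Type} (f b : List α) : List α := f ++ b.reverse

theorem dqPop_length {α : Type} {f b f' b' : List α} {x : α}
    (h : dqPop f b = some (x, (f', b'))) : f'.length + b'.length < f.length + b.length := by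
  match f, b, h with
  | [], b, h =>
    simp only [dqPop] at h
    cases hr : b.reverse with
    | nil => rw [hr] at h; cases h
    | cons y t =>
      rw [hr] at h
      obtain ⟨rfl, rfl, rfl⟩ : y = x ∧ t = f' ∧ ([] : List α) = b' := by
        simpa [Prod.ext_iff] using h
      have : b.length = t.length + 1 := by
        have h2 := congrArg List.length hr
        simpa using h2
      simp [this]
  | a :: f, b, h =>
    obtain ⟨rfl, rfl, rfl⟩ : a = x ∧ f = f' ∧ b = b' := by
      simpa [dqPop, Prod.ext_iff] using h
    simp

theorem dqPop_abs_none {α : Type} {f b : List α} (h : dqPop f b = none) : absQ f b = [] := by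
  match f, b, h with
  | [], b, h =>
    simp only [dqPop] at h
    cases hr : b.reverse with
    | nil => simp [absQ, hr]
    | cons y t => rw [hr] at h; cases h
  | a :: f, b, h => simp [dqPop] at h

theorem dqPop_abs_some {α : Type} {f b f' b' : List α} {x : α}
    (h : dqPop f b = some (x, (f', b'))) : absQ f b = x :: absQ f' b' := by
  match f, b, h with
  | [], b, h =>
    simp only [dqPop] at h
    cases hr : b.reverse with
    | nil => rw [hr] at h; cases h
    | cons y t =>
      rw [hr] at h
      obtain ⟨rfl, rfl, rfl⟩ : y = x ∧ t = f' ∧ ([] : List α) = b' := by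
        simpa [Prod.ext_iff] using h
      simp [absQ, hr]
  | a :: f, b, h =>
    obtain ⟨rfl, rfl, rfl⟩ : a = x ∧ f = f' ∧ b = b' := by
      simpa [dqPop, Prod.ext_iff] using h
    simp [absQ]

theorem scanA_eq (V : Std.TreeSet String) (front back : List (String × List String)) :
    scanA V front back = match dqPop front back with
      | none => none
      | some (e, (f', b')) =>
        if V.contains e.1 then scanA V f' b' else some (e, (f', b')) := by
  match front, back with
  | [], back =>
    simp only [scanA, dqPop]
    split
    · next hr => rw [hr]
    · next e f hr => rw [hr]
  | e :: f, back => simp [scanA, dqPop]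

theorem contains_insert_iff (V : Std.TreeSet String) (s x : String) :
    (V.insert s).contains x = true ↔ x = s ∨ V.contains x = true := by
  rw [Std.TreeSet.contains_insert, Bool.or_eq_true, beq_iff_eq]
  constructor
  · rintro (h | h)
    · exact Or.inl (Std.LawfulEqCmp.compare_eq_iff_eq.mp h).symm
    · exact Or.inr h
  · rintro (rfl | h)
    · exact Or.inl (Std.LawfulEqCmp.compare_eq_iff_eq.mpr rfl)
    · exact Or.inr h

theorem enqA (path : List String) : ∀ (l : List String) (bk : List (String × List String)),
    l.foldl (fun bk t => (t, path) :: bk) bk = (l.map (fun t => (t, path))).reverse ++ bk := by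
  intro l
  induction l with
  | nil => intro bk; rfl
  | cons t ts ih => intro bk; simp [List.foldl_cons, ih]

theorem whileA_model : ∀ (k : Nat) (f b : List (String × List String))
    (V : Std.TreeSet String) (VA : PySem.Set String),
    (∀ x, V.contains x = true ↔ x ∈ VA) →
    whileA k f b V = mLoopA k (absQ f b) VA := by
  intro k
  induction k with
  | zero => intros; rfl
  | succ k ihk =>
    suffices H : ∀ (n : Nat) (f b : List (String × List String)) (V : Std.TreeSet String)
        (VA : PySem.Set String), f.length + b.length ≤ n →
        (∀ x, V.contains x = true ↔ x ∈ VA) →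
        whileA (k + 1) f b V = mLoopA (k + 1) (absQ f b) VA by
      intro f b V VA hrel
      exact H (f.length + b.length) f b V VA le_rfl hrel
    intro n
    induction n with
    | zero =>
      intro f b V VA hlen hrel
      obtain ⟨rfl, rfl⟩ : f = [] ∧ b = [] := by
        constructor <;> (apply List.eq_nil_of_length_eq_zero; omega)
      have hs : scanA V [] [] = none := by rw [scanA_eq]; simp [dqPop]
      simp [whileA, hs, mLoopA, mScanA, absQ]
    | succ n ihn =>
      intro f b V VA hlen hrel
      cases hpop : dqPop f b with
      | none =>
        have hs : scanA V f b = none := by rw [scanA_eq, hpop]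
        rw [dqPop_abs_none hpop]
        simp [whileA, hs, mLoopA, mScanA]
      | some ep =>
        obtain ⟨⟨s, p⟩, f', b'⟩ := ep
        have habs := dqPop_abs_some hpop
        have hs : scanA V f b =
            if V.contains s then scanA V f' b' else some ((s, p), (f', b')) := by
          rw [scanA_eq, hpop]
        rw [habs]
        by_cases hc : V.contains s = true
        · have hmemVA : s ∈ VA := (hrel s).mp hc
          have h1 : whileA (k + 1) f b V = whileA (k + 1) f' b' V := by
            simp only [whileA, hs, if_pos hc]
          have h2 : mLoopA (k + 1) ((s, p) :: absQ f' b') VA =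
              mLoopA (k + 1) (absQ f' b') VA := by
            simp [mLoopA, mScanA, hmemVA]
          rw [h1, h2]
          exact ihn f' b' V VA (by have := dqPop_length hpop; omega) hrel
        · have hnotm : s ∉ VA := fun hx => hc ((hrel s).mpr hx)
          have h1 : whileA (k + 1) f b V =
              if is_goal_state s then some (p ++ [s])
              else whileA k f'
                ((get_successors s).foldl (fun bk t => (t, p ++ [s]) :: bk) b')
                (V.insert s) := by
            simp only [whileA, hs, if_neg hc]
          rw [h1]
          by_cases hg : is_goal_state s
          · simp [mLoopA, mScanA, hnotm, hg]
          · have h2 : mLoopA (k + 1) ((s, p) :: absQ f' b') VA =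
                mLoopA k (absQ f' b' ++ (get_successors s).map (fun t => (t, p ++ [s])))
                  (PySem.Set.add VA s) := by
              simp [mLoopA, mScanA, hnotm, hg]
            rw [if_neg hg, h2]
            have hrel' : ∀ x, (V.insert s).contains x = true ↔ x ∈ PySem.Set.add VA s := by
              intro x
              rw [contains_insert_iff, PySem.Set.mem_add, hrel x]
              tauto
            rw [ihk f' _ (V.insert s) (PySem.Set.add VA s) hrel']
            congr 1
            simp [absQ, enqA]

theorem recon_model : ∀ (n : Nat) (M : Std.TreeMap String String)
    (P : PySem.Dict String String) (start : String) (l : List String),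
    (∀ x, M[x]? = P.get? x) →
    reconRBT n M start l = mRecon n P start l := by
  intro n
  induction n with
  | zero => intros; rfl
  | succ n ih =>
    intro M P start l hrel
    cases l with
    | nil => rfl
    | cons x t =>
      simp only [reconRBT, mRecon]
      by_cases hx : (x == start) = true
      · rw [if_pos hx, if_pos hx]
      · rw [if_neg hx, if_neg hx, hrel x]
        cases hpx : P.get? x with
        | none => rfl
        | some q => exact ih M P start (q :: x :: t) hrel

theorem stepB_fold_model (start state : String) (e : Int) :
    ∀ (ds : List Int) (f b : List String) (M : Std.TreeMap String String)
      (P : PySem.Dict String String),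
    (∀ x, M[x]? = P.get? x) → M.size = P.size →
    (ds.foldl (stepBT start state e) ((f, b), M)).1.1 = f ∧
    absQ ((ds.foldl (stepBT start state e) ((f, b), M)).1.1)
        ((ds.foldl (stepBT start state e) ((f, b), M)).1.2)
      = (ds.foldl (mStepB start state e) (absQ f b, P)).1 ∧
    (∀ x, ((ds.foldl (stepBT start state e) ((f, b), M)).2)[x]? =
        (ds.foldl (mStepB start state e) (absQ f b, P)).2.get? x) ∧
    ((ds.foldl (stepBT start state e) ((f, b), M)).2).size =
        (ds.foldl (mStepB start state e) (absQ f b, P)).2.size := by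
  intro ds
  induction ds with
  | nil => intro f b M P h1 h2; exact ⟨rfl, rfl, h1, h2⟩
  | cons d ds ih =>
    intro f b M P h1 h2
    by_cases hcond : 0 ≤ e + d ∧ e + d < (state.toList.length : Int)
    · have hcont : M.contains (String.ofList (pySwap state.toList e (e + d))) =
          P.contains (String.ofList (pySwap state.toList e (e + d))) := by
        rw [Std.TreeMap.contains_eq_isSome_getElem?, PySem.Dict.contains_eq_isSome_get?, h1]
      by_cases hguard : String.ofList (pySwap state.toList e (e + d)) ≠ start ∧
          P.contains (String.ofList (pySwap state.toList e (e + d))) = false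
      · have hT : stepBT start state e ((f, b), M) d =
            ((f, String.ofList (pySwap state.toList e (e + d)) :: b),
             M.insert (String.ofList (pySwap state.toList e (e + d))) state) := by
          simp only [stepBT, if_pos hcond, hcont, if_pos hguard]
        have hM : mStepB start state e (absQ f b, P) d =
            (absQ f b ++ [String.ofList (pySwap state.toList e (e + d))],
             P.insert (String.ofList (pySwap state.toList e (e + d))) state) := by
          simp only [mStepB, if_pos hcond, if_pos hguard]
        have h1' : ∀ x,
            (M.insert (String.ofList (pySwap state.toList e (e + d))) state)[x]? =
            (P.insert (String.ofList (pySwap state.toList e (e + d))) state).get? x := by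
          intro x
          rw [Std.TreeMap.getElem?_insert, PySem.Dict.get?_insert, h1 x]
          by_cases hx : x = String.ofList (pySwap state.toList e (e + d))
          · rw [if_pos hx,
              if_pos (Std.LawfulEqCmp.compare_eq_iff_eq.mpr hx.symm)]
          · rw [if_neg hx,
              if_neg (fun hcc => hx (Std.LawfulEqCmp.compare_eq_iff_eq.mp hcc).symm)]
        have h2' : (M.insert (String.ofList (pySwap state.toList e (e + d))) state).size =
            (P.insert (String.ofList (pySwap state.toList e (e + d))) state).size := by
          rw [Std.TreeMap.size_insert, PySem.Dict.size_insert, hcont, hguard.2]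
          simp [h2]
        have hrec := ih f (String.ofList (pySwap state.toList e (e + d)) :: b) _ _ h1' h2'
        have habs : absQ f (String.ofList (pySwap state.toList e (e + d)) :: b) =
            absQ f b ++ [String.ofList (pySwap state.toList e (e + d))] := by
          simp [absQ]
        rw [habs] at hrec
        simp only [List.foldl_cons, hT, hM]
        exact hrec
      · have hT : stepBT start state e ((f, b), M) d = ((f, b), M) := by
          simp only [stepBT, if_pos hcond, hcont, if_neg hguard]
        have hM : mStepB start state e (absQ f b, P) d = (absQ f b, P) := by
          simp only [mStepB, if_pos hcond, if_neg hguard]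
        simp only [List.foldl_cons, hT, hM]
        exact ih f b M P h1 h2
    · have hT : stepBT start state e ((f, b), M) d = ((f, b), M) := by
        simp only [stepBT, if_neg hcond]
      have hM : mStepB start state e (absQ f b, P) d = (absQ f b, P) := by
        simp only [mStepB, if_neg hcond]
      simp only [List.foldl_cons, hT, hM]
      exact ih f b M P h1 h2

theorem whileB_model : ∀ (k : Nat) (f b : List String) (M : Std.TreeMap String String)
    (P : PySem.Dict String String) (start : String),
    (∀ x, M[x]? = P.get? x) → M.size = P.size →
    whileB k f b M start = mLoopB k (absQ f b) P start := by
  intro k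
  induction k with
  | zero => intros; rfl
  | succ k ihk =>
    intro f b M P start h1 h2
    cases hpop : dqPop f b with
    | none =>
      rw [dqPop_abs_none hpop]
      simp [whileB, hpop, mLoopB]
    | some ep =>
      obtain ⟨s, f', b'⟩ := ep
      rw [dqPop_abs_some hpop]
      by_cases hg : (s == "EEE_WWW") = true
      · simp only [whileB, hpop, if_pos hg, mLoopB]
        rw [h2]
        exact recon_model (P.size + 1) M P start [s] h1
      · obtain ⟨hqf, hqa, hm1, hm2⟩ := stepB_fold_model start s (PySem.Str.find s "_")
          [(-1 : Int), 1, -2, 2] f' b' M P h1 h2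
        simp only [whileB, hpop, if_neg hg, mLoopB]
        rw [ihk _ _ _ _ start hm1 hm2, hqa]

-- ===== VERDICT (by name: the statement is the Claim_ definition above) =====
theorem bfs_spec : Claim_equal_bfs := by
  unfold Claim_equal_bfs
  intro start _ _
  unfold Spec_bfs bfs bfs_alt
  have hA : whileA (fuelFor start) [(start, [])] [] Std.TreeSet.empty =
      mLoopA (fuelFor start) [(start, [])] PySem.Set.empty := by
    have h := whileA_model (fuelFor start) [(start, [])] [] Std.TreeSet.empty
      PySem.Set.empty (by intro x; simp [PySem.Set.empty])
    simpa [absQ] using h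
  have hB : whileB (fuelFor start) [start] [] Std.TreeMap.empty start =
      mLoopB (fuelFor start) [start] PySem.Dict.empty start := by
    have h := whileB_model (fuelFor start) [start] [] Std.TreeMap.empty
      PySem.Dict.empty start (by intro x; simp [PySem.Dict.get?_empty])
      (by simp [PySem.Dict.size_empty])
    simpa [absQ] using h
  have hmid := loops_agree (fuelFor start) [(start, [])] PySem.Set.empty
      PySem.Dict.empty start
    (by
      intro s p hmem
      simp only [ffo, PySem.Set.empty] at hmem
      simp only [List.not_mem_nil, if_neg] at hmem
      obtain ⟨rfl, rfl⟩ : s = start ∧ p = [] := by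
        constructor <;> simp [Prod.ext_iff] at hmem <;> tauto
      refine ⟨Chain.base, by simp, ?_⟩
      intro x hx
      simp at hx
      exact Or.inl hx)
    (by
      intro x
      simp [DiscP, PySem.Dict.contains_empty, PySem.Set.empty, eq_comm])
  have hinit : (ffo [(start, [])] PySem.Set.empty).map Prod.fst = [start] := by
    simp [ffo, PySem.Set.empty]
  rw [hA, hmid, hinit, ← hB]
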